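-- pv_equiv track=rewrite | github.com/banderson623/advent-of-code-2024 | 09/09-02.py | find_empty_chunks
-- ===== SOURCE A (Python) =====
-- def find_empty_chunks(blocks):
--     empty_chunks = []
--
--     empty_size = 0
--     starts_index = None
--     for i, block in enumerate(blocks):
--         if block is None:
--             if starts_index is None:
--                 starts_index = i
--             empty_size += 1
--         else:
--             if starts_index is not None:
--                 empty_chunks.append((starts_index, empty_size))
--                 starts_index = None
--                 empty_size = 0
--
--     if starts_index is not None:
--         empty_chunks.append((starts_index, empty_size))
--
--     return empty_chunks
-- ===== SOURCE B (Python) =====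
-- def find_empty_chunks(blocks):
--     # Stage 1: extract the positions of all None blocks.
--     positions = [i for i, b in enumerate(blocks) if b is None]
--     # Stage 2: merge consecutive positions into (start, size) runs,
--     # extending the last chunk in place when the position is contiguous.
--     chunks = []
--     for p in positions:
--         if chunks and p == chunks[-1][0] + chunks[-1][1]:
--             start, size = chunks.pop()
--             chunks.append((start, size + 1))
--         else:
--             chunks.append((p, 1))
--     return chunks
-- ===== Notes on version B (the rewrite author's own statement) =====
-- stated objective: alternative
-- what changed: Replaced A's single-pass state machine (open-run start/size registers plus a trailing flush) by a two-stage method: first extract the list of None positions, then merge consecutive positions into runs by extending the last completed chunk in place, with no trailing flush.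
import Mathlib
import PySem

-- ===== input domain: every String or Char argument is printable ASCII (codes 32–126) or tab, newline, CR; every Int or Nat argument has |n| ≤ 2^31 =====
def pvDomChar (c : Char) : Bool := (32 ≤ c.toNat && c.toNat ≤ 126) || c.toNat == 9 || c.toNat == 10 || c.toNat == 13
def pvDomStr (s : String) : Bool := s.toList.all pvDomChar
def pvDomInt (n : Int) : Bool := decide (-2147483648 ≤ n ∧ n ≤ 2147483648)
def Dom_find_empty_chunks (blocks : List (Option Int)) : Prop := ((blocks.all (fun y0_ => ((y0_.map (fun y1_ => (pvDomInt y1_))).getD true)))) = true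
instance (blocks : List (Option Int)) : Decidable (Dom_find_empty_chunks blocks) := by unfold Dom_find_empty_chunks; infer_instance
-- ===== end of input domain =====

-- B replaces A's single-pass open-run state machine (starts_index/empty_size + trailing flush)
-- by two stages: extract the None positions, then merge consecutive positions into chunks
-- by extending the last completed chunk in place (alternative decomposition; same cost).

-- ===== PORT A =====
-- loop body of A's for-loop; state = (empty_chunks, empty_size, starts_index)
def stepA (st : List (Int × Int) × Int × Option Int) (p : Int × Option Int) :
    List (Int × Int) × Int × Option Int :=
  match p.2 with
  | none =>
    match st.2.2 with
    | none => (st.1, st.2.1 + 1, some p.1)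
    | some s => (st.1, st.2.1 + 1, some s)
  | some _ =>
    match st.2.2 with
    | some s => (st.1 ++ [(s, st.2.1)], 0, none)
    | none => st

-- A's trailing "if starts_index is not None: append" after the loop
def flushA (st : List (Int × Int) × Int × Option Int) : List (Int × Int) :=
  match st.2.2 with
  | some s => st.1 ++ [(s, st.2.1)]
  | none => st.1

def find_empty_chunks (blocks : List (Option Int)) : List (Int × Int) :=
  flushA ((PySem.List.enumerate blocks 0).foldl stepA ([], 0, none))

-- ===== PORT B =====
-- [i for i, b in enumerate(blocks) if b is None]
def posListB (blocks : List (Option Int)) (i : Int) : List Int :=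
  ((PySem.List.enumerate blocks i).filter (fun p => p.2.isNone)).map (fun p => p.1)

-- loop body of B's second stage: extend the last chunk when contiguous, else open a new one
def stepB (chunks : List (Int × Int)) (p : Int) : List (Int × Int) :=
  match chunks.getLast? with
  | some (s, sz) =>
    if p = s + sz then chunks.dropLast ++ [(s, sz + 1)] else chunks ++ [(p, 1)]
  | none => chunks ++ [(p, 1)]

def find_empty_chunks_alt (blocks : List (Option Int)) : List (Int × Int) :=
  (posListB blocks 0).foldl stepB []

-- ===== PRECONDITION & SPEC =====
def Spec_find_empty_chunks (blocks : List (Option Int)) (out : List (Int × Int)) : Prop := out = find_empty_chunks_alt blocks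
instance (blocks : List (Option Int)) (out : List (Int × Int)) : Decidable (Spec_find_empty_chunks blocks out) := by unfold Spec_find_empty_chunks; infer_instance

-- ===== CLAIM =====
def Claim_equal_find_empty_chunks : Prop := ∀ (blocks : List (Option Int)), Dom_find_empty_chunks blocks → Spec_find_empty_chunks blocks (find_empty_chunks blocks)

-- ===== LEMMAS AND PROOFS =====

lemma posListB_cons (b : Option Int) (rest : List (Option Int)) (i : Int) :
    posListB (b :: rest) i =
      (if b.isNone then [i] else []) ++ posListB rest (i + 1) := by
  cases b <;> simp [posListB, PySem.List.enumerate_cons]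

-- joint loop invariant relating B's fold over the position list to A's fold + flush:
-- clean state: accumulators agree and acc's last chunk ends strictly before i;
-- open state (some s, size sz with s + sz = i): B's accumulator is acc ++ [(s, sz)]
lemma loop_inv (blocks : List (Option Int)) :
    (∀ (i : Int) (acc : List (Int × Int)),
       (∀ s sz, acc.getLast? = some (s, sz) → s + sz < i) →
       (posListB blocks i).foldl stepB acc =
         flushA ((PySem.List.enumerate blocks i).foldl stepA (acc, 0, none))) ∧
    (∀ (i s sz : Int) (acc : List (Int × Int)),
       s + sz = i →
       (posListB blocks i).foldl stepB (acc ++ [(s, sz)]) =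
         flushA ((PySem.List.enumerate blocks i).foldl stepA (acc, sz, some s))) := by
  induction blocks with
  | nil =>
    constructor
    · intro i acc _; simp [posListB, PySem.List.enumerate, flushA]
    · intro i s sz acc _; simp [posListB, PySem.List.enumerate, flushA]
  | cons b rest ih =>
    obtain ⟨ihC, ihO⟩ := ih
    constructor
    · intro i acc hlast
      rw [posListB_cons, PySem.List.enumerate_cons]
      match b with
      | none =>
        simp only [Option.isNone_none, if_true, List.cons_append, List.nil_append,
          List.foldl_cons, stepA]
        have hstep : stepB acc i = acc ++ [(i, 1)] := by
          unfold stepB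
          match h : acc.getLast? with
          | none => rfl
          | some (s, sz) =>
            have := hlast s sz h
            simp only
            rw [if_neg (by omega)]
        rw [hstep, show (0 : Int) + 1 = 1 from rfl]
        exact ihO (i + 1) i 1 acc (by ring)
      | some v =>
        simp only [Option.isNone_some, List.foldl_cons, stepA]
        exact ihC (i + 1) acc (fun s sz h => by have := hlast s sz h; omega)
    · intro i s sz acc hend
      rw [posListB_cons, PySem.List.enumerate_cons]
      match b with
      | none =>
        simp only [Option.isNone_none, if_true, List.cons_append, List.nil_append,
          List.foldl_cons, stepA]
        have hstep : stepB (acc ++ [(s, sz)]) i = acc ++ [(s, sz + 1)] := by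
          unfold stepB
          simp only [List.getLast?_append, List.getLast?_singleton, Option.some_or]
          rw [if_pos hend.symm]
          simp [List.dropLast_append_of_ne_nil]
        rw [hstep]
        exact ihO (i + 1) s (sz + 1) acc (by omega)
      | some v =>
        simp only [Option.isNone_some, List.foldl_cons, stepA]
        exact ihC (i + 1) (acc ++ [(s, sz)])
          (fun s' sz' h => by
            simp only [List.getLast?_append, List.getLast?_singleton, Option.some_or] at h
            cases h; omega)

-- ===== VERDICT =====
theorem find_empty_chunks_spec : Claim_equal_find_empty_chunks := by
  intro blocks _
  unfold Spec_find_empty_chunks find_empty_chunks find_empty_chunks_alt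
  exact ((loop_inv blocks).1 0 [] (by simp)).symm
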